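-- pv_equiv track=rewrite | github.com/secworks/advent_of_code_2017 | day_9/day9.py | get_groups_score
-- ===== SOURCE A (Python) =====
-- def filter_garbage(s):
--     fs = ""
--     slen = len(s)
--     in_garbage = False
--     ctr = 0
--     i = 0
--
--     while i < slen:
--         if s[i] == '!' and in_garbage:
--             i += 2
--
--         elif s[i] == '>' and in_garbage:
--             in_garbage = False
--             i += 1
--
--         elif s[i] == '<' and not in_garbage:
--             in_garbage = True
--             i += 1
--
--         else:
--             if not in_garbage:
--                 fs += s[i]
--             else:
--                 ctr += 1
--             i += 1
--
--     return fs, ctr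
--
-- def get_groups_score(s):
--     fs, ctr = filter_garbage(s)
--     groups = 0
--     group_level = 0
--     acc = 0
--     slen = len(fs)
--     i = 0
--
--     while i < slen:
--         if fs[i] == '{':
--             group_level += 1
--
--         if fs[i] == '}':
--             acc += group_level
--             groups += 1
--             group_level -= 1
--
--         i += 1
--
--     return groups, acc
-- ===== SOURCE B (Python) =====
-- def get_groups_score(s):
--     groups = 0
--     acc = 0
--     level = 0
--     in_garbage = False
--     skip = False
--     for c in s:
--         if skip:
--             skip = False
--         elif in_garbage:
--             if c == '!':
--                 skip = True
--             elif c == '>':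
--                 in_garbage = False
--         elif c == '<':
--             in_garbage = True
--         elif c == '{':
--             level += 1
--         elif c == '}':
--             acc += level
--             groups += 1
--             level -= 1
--     return groups, acc
-- ===== Notes on version B (the rewrite author's own statement) =====
-- stated objective: faster
-- what changed: Replaced the two-phase filter-then-scan (which builds a filtered string with repeated concatenation and then rescans it) by one single pass over the input that tracks the garbage state, an escape-skip flag and the brace level directly, building no intermediate string.
import Mathlib
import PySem

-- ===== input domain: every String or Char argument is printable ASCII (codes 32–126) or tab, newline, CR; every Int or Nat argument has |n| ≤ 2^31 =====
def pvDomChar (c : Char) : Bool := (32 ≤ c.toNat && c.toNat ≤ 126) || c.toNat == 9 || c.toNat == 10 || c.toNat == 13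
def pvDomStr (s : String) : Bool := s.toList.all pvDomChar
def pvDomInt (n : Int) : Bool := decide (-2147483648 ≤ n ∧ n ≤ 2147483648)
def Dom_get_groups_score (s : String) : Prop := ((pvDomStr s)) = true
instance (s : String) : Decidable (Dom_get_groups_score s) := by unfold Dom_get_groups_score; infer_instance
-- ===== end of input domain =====

-- B replaces A's filter-then-rescan (with its intermediate string) by one pass tracking
-- garbage state and brace level directly; objective: faster (no intermediate string).

-- ===== PORT A =====
-- filter_garbage: the index i advances by 1 (consume head) or by 2 on '!>' escape (drop one more)
def filterGarbage : List Char → Bool → Int → List Char × Int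
  | [], _, ctr => ([], ctr)
  | c :: rest, in_garbage, ctr =>
    if c = '!' ∧ in_garbage then filterGarbage (rest.drop 1) in_garbage ctr
    else if c = '>' ∧ in_garbage then filterGarbage rest false ctr
    else if c = '<' ∧ ¬ in_garbage then filterGarbage rest true ctr
    else if ¬ in_garbage then
      let r := filterGarbage rest in_garbage ctr
      (c :: r.1, r.2)
    else filterGarbage rest in_garbage (ctr + 1)
termination_by l _ _ => l.length
decreasing_by all_goals (simp; try omega)

-- one step of A's second while-loop (state = (groups, group_level, acc))
def scoreStep (st : Int × Int × Int) (c : Char) : Int × Int × Int :=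
  let lvl := if c = '{' then st.2.1 + 1 else st.2.1
  if c = '}' then (st.1 + 1, lvl - 1, st.2.2 + lvl) else (st.1, lvl, st.2.2)

def get_groups_score (s : String) : Int × Int :=
  let fs := (filterGarbage s.toList false 0).1
  let st := fs.foldl scoreStep (0, 0, 0)
  (st.1, st.2.2)

-- ===== PORT B =====
-- single pass: skip flag, in_garbage flag, (groups, level, acc)
def altLoop : List Char → Bool → Bool → Int → Int → Int → Int × Int
  | [], _, _, groups, _, acc => (groups, acc)
  | c :: rest, skip, in_garbage, groups, level, acc =>
    if skip then altLoop rest false in_garbage groups level acc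
    else if in_garbage then
      if c = '!' then altLoop rest true in_garbage groups level acc
      else if c = '>' then altLoop rest skip false groups level acc
      else altLoop rest skip in_garbage groups level acc
    else if c = '<' then altLoop rest skip true groups level acc
    else if c = '{' then altLoop rest skip in_garbage groups (level + 1) acc
    else if c = '}' then altLoop rest skip in_garbage (groups + 1) (level - 1) (acc + level)
    else altLoop rest skip in_garbage groups level acc

def get_groups_score_alt (s : String) : Int × Int :=
  altLoop s.toList false false 0 0 0

-- ===== PRECONDITION & SPEC =====
def Spec_get_groups_score (s : String) (out : Int × Int) : Prop := out = get_groups_score_alt s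
instance (s : String) (out : Int × Int) : Decidable (Spec_get_groups_score s out) := by unfold Spec_get_groups_score; infer_instance

-- ===== CLAIM (what is proved, stated in full; the proofs are below) =====
def Claim_equal_get_groups_score : Prop := ∀ (s : String), Dom_get_groups_score s → Spec_get_groups_score s (get_groups_score s)

-- ===== LEMMAS AND PROOFS =====
theorem altLoop_skip (l : List Char) (ing : Bool) (g lvl a : Int) :
    altLoop l true ing g lvl a = altLoop (l.drop 1) false ing g lvl a := by
  cases l <;> simp [altLoop]

theorem key (l : List Char) (ing : Bool) (ctr g lvl a : Int) :
    altLoop l false ing g lvl a =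
      (((filterGarbage l ing ctr).1.foldl scoreStep (g, lvl, a)).1,
       ((filterGarbage l ing ctr).1.foldl scoreStep (g, lvl, a)).2.2) := by
  match l with
  | [] => simp [altLoop, filterGarbage]
  | c :: rest =>
    rw [filterGarbage]
    by_cases hing : ing = true
    · subst hing
      by_cases hb : c = '!'
      · subst hb
        simp only [altLoop, if_neg (by simp : ¬(false = true))]
        rw [altLoop_skip]
        exact key (rest.drop 1) true ctr g lvl a
      · by_cases hg : c = '>'
        · subst hg
          simp only [altLoop, if_neg (by simp : ¬(false = true)),
            if_neg (by decide : ¬('>' : Char) = '!')]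
          exact key rest false ctr g lvl a
        · rw [if_neg (by simp [hb] : ¬(c = '!' ∧ true = true)),
            if_neg (by simp [hg] : ¬(c = '>' ∧ true = true)),
            if_neg (by simp : ¬(c = '<' ∧ ¬true = true)),
            if_neg (by simp : ¬(¬true = true))]
          simp only [altLoop, if_neg (by simp : ¬(false = true)),
            if_neg hb, if_neg hg]
          exact key rest true (ctr + 1) g lvl a
    · simp only [Bool.not_eq_true] at hing; subst hing
      rw [if_neg (by simp : ¬(c = '!' ∧ false = true)),
        if_neg (by simp : ¬(c = '>' ∧ false = true))]
      by_cases hl : c = '<'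
      · subst hl
        rw [if_pos (show ('<' : Char) = '<' ∧ ¬false = true from ⟨rfl, by simp⟩)]
        simp only [altLoop, if_neg (by simp : ¬(false = true))]
        exact key rest true ctr g lvl a
      · rw [if_neg (by simp [hl] : ¬(c = '<' ∧ ¬false = true)),
          if_pos (by simp : ¬false = true)]
        simp only [altLoop, if_neg (by simp : ¬(false = true)), if_neg hl]
        by_cases hob : c = '{'
        · subst hob
          rw [if_pos rfl, key rest false ctr g (lvl + 1) a]
          simp [scoreStep]
        · rw [if_neg hob]
          by_cases hcb : c = '}'
          · subst hcb
            rw [if_pos rfl, key rest false ctr (g + 1) (lvl - 1) (a + lvl)]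
            simp [scoreStep]
          · rw [if_neg hcb, key rest false ctr g lvl a]
            simp [scoreStep, hob, hcb]
termination_by l.length
decreasing_by all_goals (simp; try omega)

-- ===== VERDICT (by name: the statement is the Claim_ definition above) =====
theorem get_groups_score_spec : Claim_equal_get_groups_score := by
  intro s _
  unfold Spec_get_groups_score get_groups_score get_groups_score_alt
  rw [key s.toList false 0 0 0 0]
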